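-- pv_equiv track=rewrite | github.com/sakshamsharma/beman-website | scripts/sync-external-docs.py | sanitize_mdx_text
-- ===== SOURCE A (Python) =====
-- def sanitize_mdx_text(content: str) -> str:
--     """
--     Escape angle brackets in non-code text to avoid MDX JSX parsing errors.
--     """
--     content = content.replace("`struct ref {int * p;``", "`struct ref {int * p;}`")
--     lines = content.splitlines(keepends=True)
--     in_fence = False
--     fence_marker = ""
--     sanitized = []
--
--     for line in lines:
--         stripped = line.lstrip()
--         if stripped.startswith("```") or stripped.startswith("~~~"):
--             marker = stripped[:3]
--             if not in_fence:
--                 in_fence = True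
--                 fence_marker = marker
--             elif marker == fence_marker:
--                 in_fence = False
--                 fence_marker = ""
--             sanitized.append(line)
--             continue
--
--         if in_fence:
--             sanitized.append(line)
--             continue
--
--         parts = line.split("`")
--         for i in range(0, len(parts), 2):
--             parts[i] = (
--                 parts[i]
--                 .replace("<", "&lt;")
--                 .replace(">", "&gt;")
--                 .replace("{", "&#123;")
--                 .replace("}", "&#125;")
--             )
--         sanitized.append("`".join(parts))
--
--     return "".join(sanitized)
-- ===== SOURCE B (Python) =====
-- _ESC = {'<': '&lt;', '>': '&gt;', '{': '&#123;', '}': '&#125;'}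
--
--
-- def _escape_line(line):
--     out = []
--     code = False
--     for ch in line:
--         if ch == '`':
--             code = not code
--             out.append(ch)
--         elif code:
--             out.append(ch)
--         else:
--             out.append(_ESC.get(ch, ch))
--     return ''.join(out)
--
--
-- def sanitize_mdx_text(content: str) -> str:
--     """
--     Escape angle brackets in non-code text to avoid MDX JSX parsing errors.
--     """
--     content = content.replace("`struct ref {int * p;``", "`struct ref {int * p;}`")
--     lines = content.splitlines(keepends=True)
--
--     # phase 1: mark which lines must stay verbatim (fence lines and fenced content)
--     verbatim = []
--     fence = None
--     for line in lines:
--         head = line.lstrip()[:3]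
--         if head in ('```', '~~~'):
--             verbatim.append(True)
--             if fence is None:
--                 fence = head
--             elif head == fence:
--                 fence = None
--         else:
--             verbatim.append(fence is not None)
--
--     # phase 2: escape the unmarked lines with a single char scan
--     return ''.join(line if keep else _escape_line(line)
--                    for line, keep in zip(lines, verbatim))
-- ===== Notes on version B (the rewrite author's own statement) =====
-- stated objective: alternative
-- what changed: A's single fused loop with a bool+string fence state and a per-line split-on-backtick/escape-even-parts/rejoin with a four-stage replace chain is replaced by a two-phase pipeline: phase 1 computes a verbatim mask over the lines via an Optional fence marker, phase 2 zips lines with the mask and escapes unmarked lines by one character scan with an inline-code toggle and a lookup table.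
import Mathlib
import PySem

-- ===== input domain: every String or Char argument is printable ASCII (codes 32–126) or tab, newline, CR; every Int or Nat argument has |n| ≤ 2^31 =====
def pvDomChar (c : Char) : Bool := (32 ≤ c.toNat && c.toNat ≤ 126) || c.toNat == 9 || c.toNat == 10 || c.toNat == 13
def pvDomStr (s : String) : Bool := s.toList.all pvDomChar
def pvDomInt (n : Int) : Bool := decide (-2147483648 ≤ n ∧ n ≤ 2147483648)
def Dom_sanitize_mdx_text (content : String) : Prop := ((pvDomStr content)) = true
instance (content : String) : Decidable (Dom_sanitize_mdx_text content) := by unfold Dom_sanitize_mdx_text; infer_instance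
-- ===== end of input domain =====

-- B replaces A's fused fence-state loop and per-line split('`')/escape-even-parts/join by a
-- two-phase pipeline: a verbatim mask over the lines, then a zip with a char-scan escaper
-- (objective: alternative).

-- shared helper: Python's str.splitlines(keepends=True), exact on the domain's
-- line breaks '\n', '\r', '\r\n' (both Pythons call this same builtin)
def splitlinesKeep : List Char → List (List Char)
  | [] => []
  | '\n' :: rest => ['\n'] :: splitlinesKeep rest
  | '\r' :: '\n' :: rest => ['\r', '\n'] :: splitlinesKeep rest
  | '\r' :: rest => ['\r'] :: splitlinesKeep rest
  | c :: rest =>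
    match splitlinesKeep rest with
    | [] => [[c]]
    | h :: r => (c :: h) :: r

-- ===== PORT A =====
-- the four-stage .replace chain of A, on code points
def escChainA (s : List Char) : List Char :=
  PySem.Chars.replace
    (PySem.Chars.replace
      (PySem.Chars.replace
        (PySem.Chars.replace s ['<'] ['&','l','t',';'])
        ['>'] ['&','g','t',';'])
      ['{'] ['&','#','1','2','3',';'])
    ['}'] ['&','#','1','2','5',';']

-- one iteration of A's `for line in lines` loop; state = (in_fence, fence_marker, sanitized)
def stepA (st : Bool × List Char × List (List Char)) (line : List Char) :
    Bool × List Char × List (List Char) :=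
  let stripped := PySem.Chars.lstrip line
  if PySem.Chars.startswith stripped ['`','`','`'] ||
     PySem.Chars.startswith stripped ['~','~','~'] then
    let marker := PySem.Chars.slice stripped none (some 3)
    if !st.1 then (true, marker, st.2.2 ++ [line])
    else if marker = st.2.1 then (false, [], st.2.2 ++ [line])
    else (st.1, st.2.1, st.2.2 ++ [line])
  else if st.1 then (st.1, st.2.1, st.2.2 ++ [line])
  else
    let parts := PySem.Chars.splitOn line ['`']
    let parts := parts.mapIdx (fun i p => if i % 2 == 0 then escChainA p else p)
    (st.1, st.2.1, st.2.2 ++ [PySem.Chars.join ['`'] parts])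

def sanitize_mdx_text (content : String) : String :=
  let cs := PySem.Chars.replace content.toList
      "`struct ref {int * p;``".toList "`struct ref {int * p;}`".toList
  let lines := splitlinesKeep cs
  let st := lines.foldl stepA (false, [], [])
  String.ofList (PySem.Chars.join [] st.2.2)

-- ===== PORT B =====
-- Source B's _ESC lookup
def escCharB (c : Char) : List Char :=
  if c = '<' then ['&','l','t',';']
  else if c = '>' then ['&','g','t',';']
  else if c = '{' then ['&','#','1','2','3',';']
  else if c = '}' then ['&','#','1','2','5',';']
  else [c]

-- Source B's _escape_line: one char scan with an inline-code toggle
def escLine : List Char → Bool → List Char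
  | [], _ => []
  | c :: rest, code =>
    if c = '`' then c :: escLine rest (!code)
    else if code then c :: escLine rest code
    else escCharB c ++ escLine rest code

-- Source B's phase 1: the verbatim mask, with an Optional fence marker
def marksB : List (List Char) → Option (List Char) → List Bool
  | [], _ => []
  | line :: rest, fence =>
    let head := PySem.Chars.slice (PySem.Chars.lstrip line) none (some 3)
    if head = ['`','`','`'] ∨ head = ['~','~','~'] then
      true :: marksB rest (match fence with
        | none => some head
        | some m => if head = m then none else some m)
    else fence.isSome :: marksB rest fence

def sanitize_mdx_text_alt (content : String) : String :=
  let cs := PySem.Chars.replace content.toList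
      "`struct ref {int * p;``".toList "`struct ref {int * p;}`".toList
  let lines := splitlinesKeep cs
  let verbatim := marksB lines none
  String.ofList (PySem.Chars.join []
    (List.zipWith (fun line keep => if keep then line else escLine line false)
      lines verbatim))

-- ===== PRECONDITION & SPEC =====
def Spec_sanitize_mdx_text (content : String) (out : String) : Prop := out = sanitize_mdx_text_alt content
instance (content : String) (out : String) : Decidable (Spec_sanitize_mdx_text content out) := by unfold Spec_sanitize_mdx_text; infer_instance

-- ===== CLAIM (what is proved, stated in full; the proofs are below) =====
def Claim_equal_sanitize_mdx_text : Prop := ∀ (content : String), Dom_sanitize_mdx_text content → Spec_sanitize_mdx_text content (sanitize_mdx_text content)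

-- ===== LEMMAS AND PROOFS =====

-- proof-only: split on a single character, structurally
def splitC (c : Char) : List Char → List (List Char)
  | [] => [[]]
  | x :: t =>
    if x = c then [] :: splitC c t
    else
      match splitC c t with
      | [] => [[x]]
      | h :: r => (x :: h) :: r

-- proof-only: escape every part at even position (b = "current part is at even index")
def escEven : Bool → List (List Char) → List (List Char)
  | _, [] => []
  | b, p :: r => (if b then p.flatMap escCharB else p) :: escEven (!b) r

theorem splitC_ne_nil (c : Char) (l : List Char) : splitC c l ≠ [] := by
  cases l with
  | nil => simp [splitC]
  | cons x t =>
    simp only [splitC]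
    split
    · simp
    · split <;> simp_all

theorem replace_go_single (c : Char) (new : List Char) :
    ∀ (fuel : Nat) (l acc : List Char), l.length ≤ fuel →
      PySem.Chars.replace.go [c] new fuel l acc
        = acc.reverse ++ l.flatMap (fun x => if x = c then new else [x]) := by
  intro fuel
  induction fuel with
  | zero =>
    intro l acc h
    have : l = [] := by cases l <;> simp_all
    subst this
    simp [PySem.Chars.replace.go]
  | succ n ih =>
    intro l acc h
    cases l with
    | nil => simp [PySem.Chars.replace.go]
    | cons x t =>
      simp only [PySem.Chars.replace.go]
      by_cases hx : x = c
      · subst hx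
        rw [if_pos (by simp [List.isPrefixOf])]
        simp only [List.length_cons] at h
        simp only [List.length_cons, List.length_nil, List.drop_succ_cons, List.drop_zero]
        rw [ih t (new.reverse ++ acc) (Nat.le_of_succ_le_succ h)]
        rw [List.reverse_append, List.reverse_reverse, List.flatMap_cons, if_pos rfl,
          List.append_assoc]
      · rw [if_neg (by simp [List.isPrefixOf, Ne.symm hx])]
        simp only [List.length_cons] at h
        rw [ih t (x :: acc) (Nat.le_of_succ_le_succ h)]
        simp [hx]

theorem replace_single (c : Char) (new : List Char) (l : List Char) :
    PySem.Chars.replace l [c] new = l.flatMap (fun x => if x = c then new else [x]) := by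
  simp only [PySem.Chars.replace]
  rw [if_neg (by simp)]
  simpa using replace_go_single c new l.length l [] le_rfl

theorem escChainA_eq (l : List Char) : escChainA l = l.flatMap escCharB := by
  simp only [escChainA, replace_single, List.flatMap_assoc]
  apply List.flatMap_congr
  intro x _
  by_cases h1 : x = '<'
  · subst h1; decide
  · by_cases h2 : x = '>'
    · subst h2; decide
    · by_cases h3 : x = '{'
      · subst h3; decide
      · by_cases h4 : x = '}'
        · subst h4; decide
        · simp [h1, h2, h3, h4, escCharB]

-- the prepend-to-head helper for splitOn.go's accumulator
def consHead (pre : List Char) : List (List Char) → List (List Char)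
  | [] => [pre]
  | h :: r => (pre ++ h) :: r

theorem splitOn_go_single (c : Char) :
    ∀ (fuel : Nat) (l cur : List Char) (acc : List (List Char)), l.length ≤ fuel →
      PySem.Chars.splitOn.go [c] fuel l cur acc
        = acc.reverse ++ consHead cur.reverse (splitC c l) := by
  intro fuel
  induction fuel with
  | zero =>
    intro l cur acc h
    have : l = [] := by cases l <;> simp_all
    subst this
    simp [PySem.Chars.splitOn.go, splitC, consHead]
  | succ n ih =>
    intro l cur acc h
    cases l with
    | nil => simp [PySem.Chars.splitOn.go, splitC, consHead]
    | cons x t =>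
      simp only [PySem.Chars.splitOn.go]
      simp only [List.length_cons] at h
      by_cases hx : x = c
      · subst hx
        rw [if_pos (by simp [List.isPrefixOf])]
        simp only [List.length_cons, List.length_nil, List.drop_succ_cons, List.drop_zero]
        rw [ih t [] (cur.reverse :: acc) (Nat.le_of_succ_le_succ h)]
        simp only [List.reverse_cons, splitC, if_true]
        cases hs : splitC x t with
        | nil => exact absurd hs (splitC_ne_nil x t)
        | cons h' r => simp [consHead]
      · rw [if_neg (by simp [List.isPrefixOf, Ne.symm hx])]
        rw [ih t (x :: cur) acc (Nat.le_of_succ_le_succ h)]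
        simp only [splitC, if_neg hx, List.reverse_cons]
        cases hs : splitC c t with
        | nil => exact absurd hs (splitC_ne_nil c t)
        | cons h' r => simp [consHead]

theorem splitOn_single (c : Char) (l : List Char) :
    PySem.Chars.splitOn l [c] = splitC c l := by
  simp only [PySem.Chars.splitOn]
  rw [splitOn_go_single c (l.length + 1) l [] [] (Nat.le_succ _)]
  cases hs : splitC c l with
  | nil => exact absurd hs (splitC_ne_nil c l)
  | cons h r => simp [consHead]

theorem mapIdx_escEven :
    ∀ (ps : List (List Char)) (k : Nat),
      ps.mapIdx (fun i p => if (i + k) % 2 == 0 then escChainA p else p)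
        = escEven (k % 2 == 0) ps := by
  intro ps
  induction ps with
  | nil => intro k; simp [escEven]
  | cons p r ih =>
    intro k
    rw [List.mapIdx_cons]
    simp only [escEven, Nat.zero_add]
    congr 1
    · by_cases hk : k % 2 = 0 <;> simp [hk, escChainA_eq]
    · have harg : (fun i p => if (i + 1 + k) % 2 == 0 then escChainA p else p)
          = (fun (i : Nat) (p : List Char) => if (i + (k + 1)) % 2 == 0 then escChainA p else p) := by
        funext i p
        have : i + 1 + k = i + (k + 1) := by omega
        rw [this]
      rw [harg, ih (k + 1)]
      have h2 : (k + 1) % 2 = (k % 2 + 1) % 2 := by omega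
      rcases Nat.mod_two_eq_zero_or_one k with h | h <;> simp [h2, h]

theorem escEven_head (b : Bool) (x : Char) (h : List Char) :
    (if b then (x :: h).flatMap escCharB else x :: h)
      = (if b then escCharB x else [x]) ++ (if b then h.flatMap escCharB else h) := by
  cases b <;> simp

theorem join_escEven_cons (b : Bool) (h : List Char) (r : List (List Char)) :
    PySem.Chars.join ['`'] (escEven b (h :: r))
      = (if b then h.flatMap escCharB else h)
        ++ (if r = [] then [] else '`' :: PySem.Chars.join ['`'] (escEven (!b) r)) := by
  cases r with
  | nil => simp [escEven, PySem.Chars.join, List.intercalate]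
  | cons y ys =>
    simp only [escEven]
    rw [show PySem.Chars.join ['`']
        ((if b then h.flatMap escCharB else h)
          :: (if !b then y.flatMap escCharB else y) :: escEven (!(!b)) ys)
      = (if b then h.flatMap escCharB else h) ++ ['`'] ++ PySem.Chars.join ['`']
          ((if !b then y.flatMap escCharB else y) :: escEven (!(!b)) ys) from by
        simp [PySem.Chars.join, List.intercalate, List.intersperse]]
    simp [List.append_assoc]

theorem join_escEven_escLine :
    ∀ (l : List Char) (b : Bool),
      PySem.Chars.join ['`'] (escEven b (splitC '`' l)) = escLine l (!b) := by
  intro l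
  induction l with
  | nil =>
    intro b
    cases b <;> simp [splitC, escEven, escLine, PySem.Chars.join, List.intercalate]
  | cons x t ih =>
    intro b
    by_cases hx : x = '`'
    · subst hx
      rw [show splitC '`' ('`' :: t) = [] :: splitC '`' t from by simp [splitC]]
      rw [join_escEven_cons b [] (splitC '`' t)]
      rw [if_neg (splitC_ne_nil '`' t)]
      rw [ih (!b)]
      cases b <;> simp [escLine]
    · simp only [splitC, if_neg hx]
      cases hs : splitC '`' t with
      | nil => exact absurd hs (splitC_ne_nil _ t)
      | cons h r =>
        have hihb := ih b
        rw [hs, join_escEven_cons b h r] at hihb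
        rw [join_escEven_cons b (x :: h) r]
        rw [escEven_head]
        rw [List.append_assoc, hihb]
        cases b with
        | false => simp [escLine, hx]
        | true => simp [escLine, hx]

-- A's per-line transform equals Source B's char scan
theorem line_transform_eq (line : List Char) :
    PySem.Chars.join ['`']
        ((PySem.Chars.splitOn line ['`']).mapIdx
          (fun i p => if i % 2 == 0 then escChainA p else p))
      = escLine line false := by
  rw [splitOn_single]
  have h0 : (fun (i : Nat) (p : List Char) => if i % 2 == 0 then escChainA p else p)
      = (fun (i : Nat) (p : List Char) => if (i + 0) % 2 == 0 then escChainA p else p) := by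
    funext i p; simp
  rw [h0, mapIdx_escEven (splitC '`' line) 0]
  have := join_escEven_escLine line true
  simpa using this

-- A's fence-line test equals B's head-slice test
theorem fence_cond_eq (s : List Char) :
    (PySem.Chars.startswith s ['`','`','`'] || PySem.Chars.startswith s ['~','~','~']) = true
      ↔ (PySem.List.slice s none (some 3) = ['`','`','`']
          ∨ PySem.List.slice s none (some 3) = ['~','~','~']) := by
  have hsl : PySem.List.slice s none (some 3) = s.take 3 := by
    rw [PySem.List.slice_to s (by omega : (0:Int) ≤ 3)]
    rfl
  rw [hsl, Bool.or_eq_true, PySem.Chars.startswith_iff, PySem.Chars.startswith_iff]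
  constructor
  · rintro (h | h) <;> [left; right] <;>
      · rw [List.prefix_iff_eq_take] at h; exact h.symm
  · rintro (h | h) <;> [left; right] <;>
      · rw [List.prefix_iff_eq_take]; exact h.symm

-- the main correspondence: A's fused loop against B's mask-then-zip pipeline
theorem foldl_stepA_eq_zip :
    ∀ (lines : List (List Char)) (o : Option (List Char)) (acc : List (List Char)),
      (lines.foldl stepA (o.isSome, o.getD [], acc)).2.2
        = acc ++ List.zipWith
            (fun line keep => if keep then line else escLine line false)
            lines (marksB lines o) := by
  intro lines
  induction lines with
  | nil => intro o acc; simp [marksB]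
  | cons line rest ih =>
    intro o acc
    simp only [List.foldl_cons, stepA, marksB, PySem.Chars.slice_eq_listSlice]
    by_cases hc : PySem.List.slice (PySem.Chars.lstrip line) none (some 3) = ['`','`','`']
        ∨ PySem.List.slice (PySem.Chars.lstrip line) none (some 3) = ['~','~','~']
    · rw [if_pos ((fence_cond_eq _).mpr hc), if_pos hc]
      cases o with
      | none =>
        simp only [Option.isSome_none, Bool.not_false, if_true, Option.getD_none]
        rw [show ((true, PySem.List.slice (PySem.Chars.lstrip line) none (some 3),
              acc ++ [line]) : Bool × List Char × List (List Char))
            = ((some (PySem.List.slice (PySem.Chars.lstrip line) none (some 3))).isSome,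
               (some (PySem.List.slice (PySem.Chars.lstrip line) none (some 3))).getD [],
               acc ++ [line]) from rfl]
        rw [ih]
        simp
      | some m =>
        simp only [Option.isSome_some, Bool.not_true, Bool.false_eq_true, if_false,
          Option.getD_some]
        by_cases hm : PySem.List.slice (PySem.Chars.lstrip line) none (some 3) = m
        · rw [if_pos hm, if_pos hm]
          rw [show ((false, [], acc ++ [line]) : Bool × List Char × List (List Char))
              = ((none : Option (List Char)).isSome,
                 (none : Option (List Char)).getD [], acc ++ [line]) from rfl]
          rw [ih]
          simp
        · rw [if_neg hm, if_neg hm]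
          rw [show ((true, m, acc ++ [line]) : Bool × List Char × List (List Char))
              = ((some m).isSome, (some m).getD [], acc ++ [line]) from rfl]
          rw [ih]
          simp
    · have hb : ¬ ((PySem.Chars.startswith (PySem.Chars.lstrip line) ['`','`','`'] ||
          PySem.Chars.startswith (PySem.Chars.lstrip line) ['~','~','~']) = true) :=
        fun h => hc ((fence_cond_eq _).mp h)
      rw [if_neg hb, if_neg hc]
      cases o with
      | none =>
        simp only [Option.isSome_none, Bool.false_eq_true, if_false, Option.getD_none]
        rw [line_transform_eq]
        rw [show ((false, ([] : List Char),
              acc ++ [escLine line false]) : Bool × List Char × List (List Char))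
            = ((none : Option (List Char)).isSome,
               (none : Option (List Char)).getD [], acc ++ [escLine line false]) from rfl]
        rw [ih]
        simp
      | some m =>
        simp only [Option.isSome_some, if_true, Option.getD_some]
        rw [show ((true, m, acc ++ [line]) : Bool × List Char × List (List Char))
            = ((some m).isSome, (some m).getD [], acc ++ [line]) from rfl]
        rw [ih]
        simp

-- ===== VERDICT (by name: the statement is the Claim_ definition above) =====
theorem sanitize_mdx_text_spec : Claim_equal_sanitize_mdx_text := by
  intro content _
  unfold Spec_sanitize_mdx_text
  have h := foldl_stepA_eq_zip
    (splitlinesKeep (PySem.Chars.replace content.toList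
      "`struct ref {int * p;``".toList "`struct ref {int * p;}`".toList))
    none []
  simp only [Option.isSome_none, Option.getD_none, List.nil_append] at h
  exact congrArg (fun l => String.ofList (PySem.Chars.join [] l)) h
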